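-- pv_equiv track=rewrite | github.com/WoutDeleu/ExcelFormulaExtractor | ExcelHandler/excel_helpers.py | split_up_formulas
-- ===== SOURCE A (Python) =====
-- def split_up_formulas(excel_formula):
--     current_part = ''
--     parts = []
--     brackets_to_close = 0
--     for ch in excel_formula:
--         if ch == '(':
--             brackets_to_close += 1
--             current_part += ch
--         elif ch == ')':
--             brackets_to_close -= 1
--             current_part += ch
--         elif (ch == ',' or ch == ';') and brackets_to_close == 0:
--             parts.append(current_part)
--             current_part = ''
--         else:
--             current_part += ch
--     parts.append(current_part)
--     return parts
-- ===== SOURCE B (Python) =====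
-- def split_up_formulas(excel_formula):
--     # Pass 1: record the indices of top-level (bracket depth 0) ',' / ';' separators.
--     depth = 0
--     cuts = []
--     for i, ch in enumerate(excel_formula):
--         if ch == '(':
--             depth += 1
--         elif ch == ')':
--             depth -= 1
--         elif (ch == ',' or ch == ';') and depth == 0:
--             cuts.append(i)
--     # Pass 2: slice the original string between consecutive cut points.
--     parts = []
--     start = 0
--     for i in cuts:
--         parts.append(excel_formula[start:i])
--         start = i + 1
--     parts.append(excel_formula[start:])
--     return parts
-- ===== Notes on version B (the rewrite author's own statement) =====
-- stated objective: alternative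
-- what changed: Replaces the single accumulator loop that grows the current part character by character with two passes: one scan that only records the indices of top-level separators, then a slicing pass that cuts the original string at those indices.
import Mathlib
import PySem

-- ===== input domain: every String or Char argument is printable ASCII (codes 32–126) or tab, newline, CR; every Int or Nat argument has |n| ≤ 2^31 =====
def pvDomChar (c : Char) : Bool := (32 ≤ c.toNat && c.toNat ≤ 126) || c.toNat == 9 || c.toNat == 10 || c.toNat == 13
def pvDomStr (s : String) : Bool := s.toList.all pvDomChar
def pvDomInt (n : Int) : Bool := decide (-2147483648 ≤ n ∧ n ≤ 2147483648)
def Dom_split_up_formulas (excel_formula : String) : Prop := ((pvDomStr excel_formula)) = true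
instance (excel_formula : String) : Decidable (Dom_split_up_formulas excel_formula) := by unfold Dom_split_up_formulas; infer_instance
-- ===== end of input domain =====

-- B replaces A's character-by-character accumulator loop with two passes (collect top-level
-- separator indices, then slice the string between them); objective: alternative (same cost).

-- ===== PORT A =====
-- A's loop state: (current_part, parts, brackets_to_close)
def pvAStep (st : List Char × List (List Char) × Int) (ch : Char) :
    List Char × List (List Char) × Int :=
  if ch = '(' then (st.1 ++ [ch], st.2.1, st.2.2 + 1)
  else if ch = ')' then (st.1 ++ [ch], st.2.1, st.2.2 - 1)
  else if (ch = ',' ∨ ch = ';') ∧ st.2.2 = 0 then ([], st.2.1 ++ [st.1], st.2.2)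
  else (st.1 ++ [ch], st.2.1, st.2.2)

def split_up_formulas (excel_formula : String) : List String :=
  let st := excel_formula.toList.foldl pvAStep ([], [], 0)
  (st.2.1 ++ [st.1]).map String.ofList

-- ===== PORT B =====
-- B's pass 1 state: (depth, cuts)
def pvBCutStep (st : Int × List Int) (p : Int × Char) : Int × List Int :=
  if p.2 = '(' then (st.1 + 1, st.2)
  else if p.2 = ')' then (st.1 - 1, st.2)
  else if (p.2 = ',' ∨ p.2 = ';') ∧ st.1 = 0 then (st.1, st.2 ++ [p.1])
  else st

-- B's pass 2 state: (parts, start)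
def pvBSliceStep (s : String) (acc : List String × Int) (i : Int) : List String × Int :=
  (acc.1 ++ [PySem.Str.slice s (some acc.2) (some i)], i + 1)

def split_up_formulas_alt (excel_formula : String) : List String :=
  let sc := (PySem.List.enumerate excel_formula.toList 0).foldl pvBCutStep (0, [])
  let fin := sc.2.foldl (pvBSliceStep excel_formula) ([], 0)
  fin.1 ++ [PySem.Str.slice excel_formula (some fin.2) none]

-- ===== PRECONDITION & SPEC =====
def Spec_split_up_formulas (excel_formula : String) (out : List String) : Prop := out = split_up_formulas_alt excel_formula
instance (excel_formula : String) (out : List String) : Decidable (Spec_split_up_formulas excel_formula out) := by unfold Spec_split_up_formulas; infer_instance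

-- ===== CLAIM (what is proved, stated in full; the proofs are below) =====
def Claim_equal_split_up_formulas : Prop := ∀ (excel_formula : String), Dom_split_up_formulas excel_formula → Spec_split_up_formulas excel_formula (split_up_formulas excel_formula)

-- ===== LEMMAS AND PROOFS =====

-- reference splitting function both ports are reduced to
def pvConsHd (c : Char) : List (List Char) → List (List Char)
  | [] => []
  | p :: ps => (c :: p) :: ps

def pvAppHd (pre : List Char) : List (List Char) → List (List Char)
  | [] => []
  | p :: ps => (pre ++ p) :: ps

def pvRef : List Char → Int → List (List Char)
  | [], _ => [[]]
  | c :: cs, d =>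
    if c = '(' then pvConsHd c (pvRef cs (d + 1))
    else if c = ')' then pvConsHd c (pvRef cs (d - 1))
    else if (c = ',' ∨ c = ';') ∧ d = 0 then [] :: pvRef cs d
    else pvConsHd c (pvRef cs d)

def pvCutsFrom : List Char → Int → Int → List Int
  | [], _, _ => []
  | c :: cs, k, d =>
    if c = '(' then pvCutsFrom cs (k + 1) (d + 1)
    else if c = ')' then pvCutsFrom cs (k + 1) (d - 1)
    else if (c = ',' ∨ c = ';') ∧ d = 0 then k :: pvCutsFrom cs (k + 1) d
    else pvCutsFrom cs (k + 1) d

theorem pvAppHd_consHd (pre : List Char) (c : Char) (l : List (List Char)) :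
    pvAppHd pre (pvConsHd c l) = pvAppHd (pre ++ [c]) l := by
  cases l <;> simp [pvAppHd, pvConsHd]

theorem pvAppHd_nil (l : List (List Char)) : pvAppHd [] l = l := by
  cases l <;> simp [pvAppHd]

-- A's fold equals `parts ++ pvAppHd cur (pvRef cs d)`
theorem pvA_fold (cs : List Char) : ∀ (cur : List Char) (parts : List (List Char)) (d : Int),
    (cs.foldl pvAStep (cur, parts, d)).2.1 ++ [(cs.foldl pvAStep (cur, parts, d)).1]
      = parts ++ pvAppHd cur (pvRef cs d) := by
  induction cs with
  | nil => intro cur parts d; simp [pvRef, pvAppHd]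
  | cons c cs ih =>
    intro cur parts d
    simp only [List.foldl_cons, pvRef]
    by_cases h1 : c = '('
    · simp [pvAStep, h1, ih, pvAppHd_consHd]
    · by_cases h2 : c = ')'
      · simp [pvAStep, h1, h2, ih, pvAppHd_consHd]
      · by_cases h3 : (c = ',' ∨ c = ';') ∧ d = 0
        · simp [pvAStep, h1, h2, h3, ih, pvAppHd_nil]
          simp [pvAppHd]
        · simp [pvAStep, h1, h2, h3, ih, pvAppHd_consHd]

-- B's first pass computes pvCutsFrom
theorem pvB_cuts (cs : List Char) : ∀ (k d : Int) (acc : List Int),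
    ((PySem.List.enumerate cs k).foldl pvBCutStep (d, acc)).2 = acc ++ pvCutsFrom cs k d := by
  induction cs with
  | nil => intro k d acc; simp [PySem.List.enumerate_nil, pvCutsFrom]
  | cons c cs ih =>
    intro k d acc
    rw [PySem.List.enumerate_cons]
    simp only [List.foldl_cons, pvCutsFrom]
    by_cases h1 : c = '('
    · simp [pvBCutStep, h1, ih]
    · by_cases h2 : c = ')'
      · simp [pvBCutStep, h1, h2, ih]
      · by_cases h3 : (c = ',' ∨ c = ';') ∧ d = 0
        · simp [pvBCutStep, h1, h2, h3, ih]
        · simp [pvBCutStep, h1, h2, h3, ih]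

-- B's second pass over the cut indices reconstructs pvRef
theorem pvB_slices (s : String) (full : List Char) (hs : s.toList = full) :
    ∀ (cs : List Char) (k : Int) (d : Int) (acc : List String) (start : Int),
    0 ≤ start → start ≤ k → cs = full.drop k.toNat →
    ((pvCutsFrom cs k d).foldl (pvBSliceStep s) (acc, start)).1
        ++ [PySem.Str.slice s (some ((pvCutsFrom cs k d).foldl (pvBSliceStep s) (acc, start)).2) none]
      = acc ++ (pvAppHd ((full.drop start.toNat).take (k.toNat - start.toNat)) (pvRef cs d)).map String.ofList := by
  intro cs
  induction cs with
  | nil =>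
    intro k d acc start h0 hsk hdrop
    have hlen : full.length ≤ k.toNat := by
      by_contra h
      have := congrArg List.length hdrop
      simp at this; omega
    have htake : (full.drop start.toNat).take (k.toNat - start.toNat) = full.drop start.toNat := by
      apply List.take_of_length_le; simp; omega
    simp [pvCutsFrom, pvRef, pvAppHd, htake, PySem.Str.slice, PySem.List.slice_from _ h0, hs]
  | cons c cs ih =>
    intro k d acc start h0 hsk hdrop
    have hk0 : 0 ≤ k := le_trans h0 hsk
    have hk1 : (k + 1).toNat = k.toNat + 1 := by omega
    have hdrop' : cs = full.drop (k + 1).toNat := by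
      rw [hk1]
      have : full.drop (k.toNat + 1) = (full.drop k.toNat).drop 1 := by
        rw [List.drop_drop]
      rw [this, ← hdrop]; simp
    have hget : full[k.toNat]? = some c := by
      have : (full.drop k.toNat)[0]? = full[k.toNat + 0]? := List.getElem?_drop
      rw [← hdrop] at this; simpa using this.symm
    -- extending the prefix by one character
    have hext : ∀ (st : Int), 0 ≤ st → st ≤ k →
        (full.drop st.toNat).take ((k + 1).toNat - st.toNat)
          = (full.drop st.toNat).take (k.toNat - st.toNat) ++ [c] := by
      intro st h0' hle
      have hn : (k + 1).toNat - st.toNat = (k.toNat - st.toNat) + 1 := by omega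
      rw [hn, List.take_add_one]
      congr 1
      have : (full.drop st.toNat)[k.toNat - st.toNat]? = full[st.toNat + (k.toNat - st.toNat)]? :=
        List.getElem?_drop
      have heq : st.toNat + (k.toNat - st.toNat) = k.toNat := by omega
      rw [heq] at this
      rw [this, hget]; rfl
    simp only [pvCutsFrom, pvRef]
    by_cases h1 : c = '('
    · simp only [if_pos h1]
      rw [ih (k + 1) (d + 1) acc start h0 (by omega) hdrop',
        hext start h0 hsk]
      simp [pvAppHd_consHd]
    · by_cases h2 : c = ')'
      · simp only [if_neg h1, if_pos h2]
        rw [ih (k + 1) (d - 1) acc start h0 (by omega) hdrop',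
          hext start h0 hsk]
        simp [pvAppHd_consHd]
      · by_cases h3 : (c = ',' ∨ c = ';') ∧ d = 0
        · simp only [if_neg h1, if_neg h2, if_pos h3, List.foldl_cons]
          have hstep : pvBSliceStep s (acc, start) k
              = (acc ++ [String.ofList ((full.drop start.toNat).take (k.toNat - start.toNat))], k + 1) := by
            simp [pvBSliceStep, PySem.Str.slice, PySem.List.slice_toNat _ h0 hk0, hs]
          rw [hstep, ih (k + 1) d _ (k + 1) (by omega) (by omega) hdrop']
          have : (full.drop (k + 1).toNat).take ((k + 1).toNat - (k + 1).toNat) = [] := by simp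
          rw [this, pvAppHd_nil]
          cases hr : pvRef cs d <;> simp [pvAppHd]
        · simp only [if_neg h1, if_neg h2, if_neg h3]
          rw [ih (k + 1) d acc start h0 (by omega) hdrop',
            hext start h0 hsk]
          simp [pvAppHd_consHd]

-- ===== VERDICT (by name: the statement is the Claim_ definition above) =====
theorem split_up_formulas_spec : Claim_equal_split_up_formulas := by
  intro s _
  show split_up_formulas s = split_up_formulas_alt s
  show List.map String.ofList ((s.toList.foldl pvAStep ([], [], 0)).2.1 ++ [(s.toList.foldl pvAStep ([], [], 0)).1])
      = ((((PySem.List.enumerate s.toList 0).foldl pvBCutStep (0, [])).2).foldl (pvBSliceStep s) ([], 0)).1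
        ++ [PySem.Str.slice s
            (some (((((PySem.List.enumerate s.toList 0).foldl pvBCutStep (0, [])).2).foldl (pvBSliceStep s) ([], 0)).2)) none]
  rw [pvA_fold s.toList [] [] 0, pvB_cuts s.toList 0 0 []]
  rw [show ([] ++ pvCutsFrom s.toList 0 0) = pvCutsFrom s.toList 0 0 from List.nil_append _]
  rw [pvB_slices s s.toList rfl (s.toList) 0 0 [] 0 le_rfl le_rfl (by simp)]
  simp [pvAppHd_nil]
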